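-- pv_equiv track=rewrite | github.com/JasonBarrett77/optiv-lib | src/optiv_lib/providers/pan/objects/url_category/model.py | _normalize_urls
-- ===== SOURCE A (Python) =====
-- from typing import Literal, Optional, Sequence, Tuple
--
-- def _normalize_urls(urls: Sequence[str]) -> tuple[str, ...]:
--     """
--     Trim, drop empties, dedupe (case-sensitive to preserve intent), sort case-insensitively.
--     """
--     trimmed = (s.strip() for s in urls)
--     kept = [s for s in trimmed if s]
--     # dedupe preserving first occurrence
--     seen: set[str] = set()
--     dedup: list[str] = []
--     for s in kept:
--         if s not in seen:
--             seen.add(s)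
--             dedup.append(s)
--     return tuple(sorted(dedup, key=lambda s: s.casefold()))
-- ===== SOURCE B (Python) =====
-- def _normalize_urls(urls):
--     """One fused pass: keep the output sorted case-insensitively at all times,
--     skipping exact duplicates and inserting each new string after every element
--     whose casefold key is <= its own (no seen-set, no library sort)."""
--     kept = [t for t in (s.strip() for s in urls) if t]
--     out = []
--     for s in kept:
--         if s in out:
--             continue
--         k = s.casefold()
--         i = 0
--         while i < len(out) and out[i].casefold() <= k:
--             i += 1
--         out.insert(i, s)
--     return tuple(out)
-- ===== Notes on version B (the rewrite author's own statement) =====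
-- stated objective: alternative
-- what changed: Replaces A's three-stage pipeline (seen-set dedupe pass, then a library stable sort by casefold) with a single insertion pass that keeps the output list sorted at all times: each kept string is skipped if already present and otherwise spliced in after every element whose casefold key is <= its own.
import Mathlib
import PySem

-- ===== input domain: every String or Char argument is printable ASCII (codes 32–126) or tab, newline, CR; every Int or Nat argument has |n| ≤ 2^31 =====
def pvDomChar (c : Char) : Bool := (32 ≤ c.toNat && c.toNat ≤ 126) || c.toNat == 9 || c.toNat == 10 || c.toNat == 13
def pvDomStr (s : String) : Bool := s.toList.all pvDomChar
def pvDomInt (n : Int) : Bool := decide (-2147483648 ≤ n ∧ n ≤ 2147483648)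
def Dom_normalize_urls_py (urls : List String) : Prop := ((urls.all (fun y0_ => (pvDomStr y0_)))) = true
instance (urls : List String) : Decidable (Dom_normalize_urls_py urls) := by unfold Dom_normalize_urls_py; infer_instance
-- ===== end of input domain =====

-- B replaces A's seen-set dedupe pass + library stable sort with one fused insertion pass that keeps its output sorted (objective: alternative, same results).
-- Both ports render Python's str.casefold as PySem.Str.lower, exact on the ASCII input domain Dom_ above.

-- ===== PORT A =====
def normalize_urls_py (urls : List String) : List String :=
  let kept := (urls.map PySem.Str.strip).filter (fun s => !(s == ""))
  let st := kept.foldl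
    (fun (st : PySem.Set String × List String) s =>
      if !(PySem.Set.contains st.1 s) then (PySem.Set.add st.1 s, st.2 ++ [s]) else st)
    (PySem.Set.empty, [])
  PySem.List.sorted st.2 (fun s => PySem.Str.lower s)

-- ===== PORT B =====
-- Source B's loop: the accumulator 'out' is kept sorted; exact duplicates are skipped,
-- a new string is spliced in after every element with casefold key <= its own
def normalize_urls_py_alt (urls : List String) : List String :=
  ((urls.map PySem.Str.strip).filter (fun t => !(t == ""))).foldl
    (fun out s =>
      if out.contains s then out
      else
        out.takeWhile (fun y => decide (PySem.Str.lower y ≤ PySem.Str.lower s)) ++ [s] ++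
          out.dropWhile (fun y => decide (PySem.Str.lower y ≤ PySem.Str.lower s)))
    []

-- ===== PRECONDITION & SPEC =====
def Spec_normalize_urls_py (urls : List String) (out : List String) : Prop := out = normalize_urls_py_alt urls
instance (urls : List String) (out : List String) : Decidable (Spec_normalize_urls_py urls out) := by unfold Spec_normalize_urls_py; infer_instance

-- ===== CLAIM (what is proved, stated in full; the proofs are below) =====
def Claim_equal_normalize_urls_py : Prop := ∀ (urls : List String), Dom_normalize_urls_py urls → Spec_normalize_urls_py urls (normalize_urls_py urls)

-- ===== LEMMAS AND PROOFS =====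

theorem pv_insertBy_cons (bef : String → String → Bool) (x y : String) (ys : List String) :
    PySem.List.insertBy bef x (y :: ys)
      = if bef x y then x :: y :: ys else y :: PySem.List.insertBy bef x ys := rfl

-- A's dedupe loop keeps its two accumulators equal: both are the running PySem.Set
theorem pv_foldA {α : Type} [BEq α] [LawfulBEq α] (l acc : List α) :
    l.foldl
      (fun (st : PySem.Set α × List α) s =>
        if !(PySem.Set.contains st.1 s) then (PySem.Set.add st.1 s, st.2 ++ [s]) else st)
      (acc, acc)
    = (PySem.Set.update acc l, PySem.Set.update acc l) := by
  induction l generalizing acc with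
  | nil => rfl
  | cons x l ih =>
    by_cases hx : x ∈ acc
    · have h1 : PySem.Set.contains acc x = true := (PySem.Set.contains_iff acc x).2 hx
      have h2 : PySem.Set.add acc x = acc := PySem.Set.add_of_mem hx
      have hstep : (if !(PySem.Set.contains acc x) then
            (PySem.Set.add acc x, acc ++ [x]) else ((acc, acc) : PySem.Set α × List α))
          = (acc, acc) := by simp [hx]
      simp only [List.foldl_cons]
      rw [hstep, ih acc]
      simp [PySem.Set.update, h2]
    · have h1 : PySem.Set.contains acc x = false := by
        cases h : PySem.Set.contains acc x
        · rfl
        · exact absurd ((PySem.Set.contains_iff acc x).1 h) hx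
      have h2 : PySem.Set.add acc x = acc ++ [x] := PySem.Set.add_of_not_mem hx
      have hstep : (if !(PySem.Set.contains acc x) then
            (PySem.Set.add acc x, acc ++ [x]) else ((acc, acc) : PySem.Set α × List α))
          = (acc ++ [x], acc ++ [x]) := by simp [hx]
      simp only [List.foldl_cons]
      rw [hstep, ih (acc ++ [x])]
      simp [PySem.Set.update, h2]

-- Source B's splice (scan while key <= key of s) is exactly one stable-insertion step
theorem pv_splice_eq_insertBy (x : String) (L : List String) :
    L.takeWhile (fun y => decide (PySem.Str.lower y ≤ PySem.Str.lower x)) ++ [x] ++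
      L.dropWhile (fun y => decide (PySem.Str.lower y ≤ PySem.Str.lower x))
    = PySem.List.insertBy (fun a b => decide (PySem.Str.lower a < PySem.Str.lower b)) x L := by
  induction L with
  | nil => rfl
  | cons y t ih =>
    by_cases h : PySem.Str.lower y ≤ PySem.Str.lower x
    · have h' : PySem.Chars.lower y.toList ≤ PySem.Chars.lower x.toList := by simpa using h
      have h2 : ¬ PySem.Chars.lower x.toList < PySem.Chars.lower y.toList := by
        simpa using not_lt.2 h
      simp at ih
      simp [pv_insertBy_cons, h', h2, ih]
    · have h' : ¬ PySem.Chars.lower y.toList ≤ PySem.Chars.lower x.toList := by simpa using h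
      have h2 : PySem.Chars.lower x.toList < PySem.Chars.lower y.toList := by
        simpa using not_le.1 h
      simp [pv_insertBy_cons, h', h2]

-- appending one element and re-sorting is one insertion into the sorted list
theorem pv_sorted_append (x : String) (S : List String) :
    PySem.List.sorted (S ++ [x]) (fun s => PySem.Str.lower s)
      = PySem.List.insertBy (fun a b => decide (PySem.Str.lower a < PySem.Str.lower b)) x
          (PySem.List.sorted S (fun s => PySem.Str.lower s)) := by
  rw [PySem.List.sorted_eq_foldl_insertBy, PySem.List.sorted_eq_foldl_insertBy,
    List.foldl_append]
  rfl

-- invariant of Source B's loop: starting from sorted(T), it computes sorted(T updated with l)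
theorem pv_foldB (l T : List String) :
    l.foldl
      (fun out s =>
        if out.contains s then out
        else
          out.takeWhile (fun y => decide (PySem.Str.lower y ≤ PySem.Str.lower s)) ++ [s] ++
            out.dropWhile (fun y => decide (PySem.Str.lower y ≤ PySem.Str.lower s)))
      (PySem.List.sorted T (fun s => PySem.Str.lower s))
    = PySem.List.sorted (PySem.Set.update T l) (fun s => PySem.Str.lower s) := by
  induction l generalizing T with
  | nil => rfl
  | cons x l ih =>
    simp only [List.foldl_cons]
    by_cases hx : x ∈ T
    · have hc : (PySem.List.sorted T (fun s => PySem.Str.lower s)).contains x = true := by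
        simp [PySem.List.mem_sorted, hx]
      have h2 : PySem.Set.add T x = T := PySem.Set.add_of_mem hx
      rw [if_pos hc, ih T]
      simp [PySem.Set.update, h2]
    · have hc : ¬ (PySem.List.sorted T (fun s => PySem.Str.lower s)).contains x = true := by
        simp [PySem.List.mem_sorted, hx]
      have h2 : T ++ [x] = PySem.Set.add T x := (PySem.Set.add_of_not_mem hx).symm
      rw [if_neg hc, pv_splice_eq_insertBy, ← pv_sorted_append, h2, ih (PySem.Set.add T x)]
      simp [PySem.Set.update]

-- ===== VERDICT (by name: the statement is the Claim_ definition above) =====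
theorem normalize_urls_py_spec : Claim_equal_normalize_urls_py := by
  intro urls _
  unfold Spec_normalize_urls_py normalize_urls_py normalize_urls_py_alt
  dsimp only
  have hA := pv_foldA ((urls.map PySem.Str.strip).filter (fun s => !(s == ""))) ([] : List String)
  rw [show (PySem.Set.empty : PySem.Set String) = ([] : List String) from rfl, hA]
  exact (pv_foldB ((urls.map PySem.Str.strip).filter (fun t => !(t == ""))) []).symm
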